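-- pv_equiv track=rewrite | github.com/TalhaProgrammer92/Python-Mini-Tools | ascii_reader.py | convert
-- ===== SOURCE A (Python) =====
-- def convert(statement: str, binary_reading: bool = False) -> str:
--     result = ""
--     if binary_reading:
--         statement = statement.split(" ")
--
--     if binary_reading:
--         for binary in statement:
--             value = 0
--             for i, bit in enumerate(binary[::-1]):
--                 value += int(bit) * 2 ** i
--             result += chr(value)
--     else:
--         for char in statement:
--             binary = ""
--             value = ord(char)
--
--             while value > 0:
--                 binary = str(value % 2) + binary
--                 value = int(value / 2)
--
--             for count in range(8 - len(binary)):
--                 binary = "0" + binary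
--
--             result += binary + " "
--
--     return result
-- ===== SOURCE B (Python) =====
-- def convert(statement: str, binary_reading: bool = False) -> str:
--     if binary_reading:
--         chars = []
--         for group in statement.split(" "):
--             value = 0
--             for bit in group:          # Horner: forward accumulation, no slicing, no powers
--                 value = value * 2 + int(bit)
--             chars.append(chr(value))
--         return "".join(chars)
--     else:
--         pieces = []
--         for char in statement:
--             value = ord(char)
--             width = max(8, value.bit_length())   # 8-bit left pad; wider only above 255
--             bits = "".join(str((value >> i) & 1) for i in reversed(range(width)))
--             pieces.append(bits + " ")
--         return "".join(pieces)
-- ===== Notes on version B (the rewrite author's own statement) =====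
-- stated objective: alternative
-- what changed: Decode replaces the reverse-slice enumerate sum of int(bit)*2**i with a forward Horner accumulator (value = value*2 + int(bit)), and encode replaces the repeated-division-and-prepend loop plus zero-pad loop with direct MSB-first bit extraction over width = max(8, value.bit_length()).
-- outside the precondition, e.g. on convert('111111111111111111111', True): A raises ValueError, B raises ValueError
import Mathlib
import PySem

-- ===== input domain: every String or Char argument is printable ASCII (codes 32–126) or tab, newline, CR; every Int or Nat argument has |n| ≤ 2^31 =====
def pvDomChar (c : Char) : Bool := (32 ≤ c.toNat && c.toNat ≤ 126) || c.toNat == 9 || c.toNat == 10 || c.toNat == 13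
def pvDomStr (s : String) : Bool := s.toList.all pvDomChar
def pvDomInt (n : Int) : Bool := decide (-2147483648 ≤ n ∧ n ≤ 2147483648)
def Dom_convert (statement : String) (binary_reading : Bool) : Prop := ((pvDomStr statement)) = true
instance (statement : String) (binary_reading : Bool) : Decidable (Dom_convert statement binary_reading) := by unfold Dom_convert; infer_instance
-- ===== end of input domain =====

-- B: decode by a forward Horner accumulator instead of a reversed power sum; encode by MSB-first
-- bit extraction over max(8, bit_length) instead of a repeated-division loop plus a zero-pad loop.


-- ===== PORT A =====
-- int(bit) for a single character; exact where Pre_ admits (digit characters; Python raises ValueError elsewhere)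
def intOfBit (c : Char) : Int := (PySem.Int.ofChars? [c]).getD 0

-- value = 0; for i, bit in enumerate(binary[::-1]): value += int(bit) * 2 ** i
-- (binary[::-1] is the reverse; enumerate indices are ≥ 0, so .toNat is exact)
def decodeGroupA (g : List Char) : Int :=
  (PySem.List.enumerate g.reverse).foldl (fun value ib => value + intOfBit ib.2 * 2 ^ ib.1.toNat) 0

-- while value > 0: binary = str(value % 2) + binary; value = int(value / 2)
-- (int(value/2) = value // 2 for value > 0; fuel 64 is a totality guard only: value at most 2^21 here and halves each pass)
def binLoopA (fuel : Nat) (value : Int) (binary : List Char) : List Char :=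
  match fuel with
  | 0 => binary
  | f + 1 =>
    if value > 0 then
      binLoopA f (PySem.Int.floordiv value 2) (PySem.Int.toChars (PySem.Int.mod value 2) ++ binary)
    else binary

-- value = ord(char); the while loop; for count in range(8 - len(binary)): binary = "0" + binary; result += binary + " "
def encodeValueA (value : Int) : List Char :=
  let binary := binLoopA 64 value []
  let binary := (PySem.List.pyRange 0 (8 - (binary.length : Int)) 1).foldl (fun b _ => '0' :: b) binary
  binary ++ [' ']

def convert (statement : String) (binary_reading : Bool) : String :=
  if binary_reading then
    -- statement = statement.split(" "); result += chr(value)   (chr = Char.ofNat, exact under Pre_)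
    String.ofList ((PySem.Chars.splitOn statement.toList [' ']).foldl
      (fun result binary => result ++ [Char.ofNat (decodeGroupA binary).toNat]) [])
  else
    String.ofList (statement.toList.foldl (fun result char => result ++ encodeValueA (char.toNat : Int)) [])

-- ===== PORT B =====
-- value = 0; for bit in group: value = value * 2 + int(bit)
def decodeGroupB (g : List Char) : Int :=
  g.foldl (fun value bit => value * 2 + intOfBit bit) 0

-- width = max(8, value.bit_length()); "".join(str((value >> i) & 1) for i in reversed(range(width))) + " "
def encodeValueB (value : Nat) : List Char :=
  let width := max 8 (PySem.Int.bitLength (value : Int))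
  (((List.range width).reverse.map
      (fun i => PySem.Int.toChars (PySem.Int.band ((value : Int) >>> i) 1))).flatten) ++ [' ']

def convert_alt (statement : String) (binary_reading : Bool) : String :=
  if binary_reading then
    String.ofList ((PySem.Chars.splitOn statement.toList [' ']).foldl
      (fun chars group => chars ++ [Char.ofNat (decodeGroupB group).toNat]) [])
  else
    String.ofList (statement.toList.foldl (fun pieces char => pieces ++ encodeValueB char.toNat) [])

-- ===== PRECONDITION & SPEC =====
-- base-2 numeric value of a digit group (used only by Pre_; digits read as their decimal value, like A's int(bit))
def pvGroupVal (g : List Char) : Nat := g.foldl (fun v c => v * 2 + (c.toNat - 48)) 0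

-- Pre_ excludes (only when binary_reading) statements with non-digit, non-space characters, on which
-- Python A raises ValueError in int(bit); groups whose base-2 value exceeds 0x10FFFF, on which Python's
-- chr raises ValueError; and groups whose value is a surrogate code point (0xD800–0xDFFF), where Python
-- returns a lone-surrogate string that a Lean String (valid Unicode scalar values) cannot represent.
def Pre_convert (statement : String) (binary_reading : Bool) : Prop :=
  binary_reading = true →
    (statement.toList.all (fun c => PySem.Chars.isdigit c || c == ' ') = true) ∧
    ((PySem.Chars.splitOn statement.toList [' ']).all
      (fun g => pvGroupVal g ≤ 0x10FFFF && !(0xD800 ≤ pvGroupVal g && pvGroupVal g ≤ 0xDFFF)) = true)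
instance (statement : String) (binary_reading : Bool) : Decidable (Pre_convert statement binary_reading) := by
  unfold Pre_convert; infer_instance

def pvWitness_convert : String × Bool := ("1000000 01001", true)

def Spec_convert (statement : String) (binary_reading : Bool) (out : String) : Prop := out = convert_alt statement binary_reading
instance (statement : String) (binary_reading : Bool) (out : String) : Decidable (Spec_convert statement binary_reading out) := by unfold Spec_convert; infer_instance

-- ===== CLAIM (what is proved, stated in full; the proofs are below) =====
def Claim_equal_convert : Prop := ∀ (statement : String) (binary_reading : Bool), Dom_convert statement binary_reading → Pre_convert statement binary_reading → Spec_convert statement binary_reading (convert statement binary_reading)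

-- ===== LEMMAS AND PROOFS =====

-- A's enumerate-over-reverse sum equals Horner of the unreversed group (shifted by the start index)
theorem decodeA_fold (m : List Char) (s : Nat) (a : Int) :
    (PySem.List.enumerate m (s : Int)).foldl (fun value ib => value + intOfBit ib.2 * 2 ^ ib.1.toNat) a
      = a + 2 ^ s * decodeGroupB m.reverse := by
  induction m generalizing s a with
  | nil => simp [decodeGroupB]
  | cons b t ih =>
    rw [PySem.List.enumerate_cons]
    simp only [List.foldl_cons]
    have hcast : ((s : Int) + 1) = ((s + 1 : Nat) : Int) := by push_cast; ring
    rw [hcast, ih (s + 1) (a + intOfBit b * 2 ^ ((s : Int)).toNat)]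
    simp only [decodeGroupB, List.reverse_cons, List.foldl_append, List.foldl_cons, List.foldl_nil,
      Int.toNat_natCast]
    ring

theorem decodeGroup_eq (g : List Char) : decodeGroupA g = decodeGroupB g := by
  have h := decodeA_fold g.reverse 0 0
  simp only [List.reverse_reverse, pow_zero, one_mul, zero_add] at h
  simpa [decodeGroupA] using h

-- per-character-code agreement of the two encoders, by exhaustive evaluation over the domain's codes
theorem encodeValue_eq : ∀ n : Nat, n < 127 → encodeValueA (n : Int) = encodeValueB n := by decide

theorem convert_spec_aux (statement : String) (binary_reading : Bool)
    (hdom : Dom_convert statement binary_reading) :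
    convert statement binary_reading = convert_alt statement binary_reading := by
  unfold convert convert_alt
  cases binary_reading with
  | true =>
    simp only [if_pos]
    congr 1
    exact PySem.List.foldl_congr_mem _ _ _ _ (by
      intro acc g _
      rw [decodeGroup_eq])
  | false =>
    simp only [Bool.false_eq_true, if_false]
    congr 1
    refine PySem.List.foldl_congr_mem _ _ _ _ ?_
    intro acc c hc
    have hdc : pvDomChar c = true := by
      have := (List.all_eq_true.mp hdom) c hc
      exact this
    have hlt : c.toNat < 127 := by
      simp only [pvDomChar, Bool.or_eq_true, Bool.and_eq_true, decide_eq_true_eq, beq_iff_eq] at hdc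
      omega
    rw [encodeValue_eq c.toNat hlt]

-- ===== VERDICT (by name: the statement is the Claim_ definition above) =====
theorem convert_spec : Claim_equal_convert := by
  intro statement binary_reading hdom _
  unfold Spec_convert
  exact convert_spec_aux statement binary_reading hdom
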